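-- pv_equiv track=rewrite | github.com/tongosu/ddonilang | tests/run_text_surface_registry_table_check.py | _prefix_conflicts
-- ===== SOURCE A (Python) =====
-- def _prefix_conflicts(names: list[str]) -> list[tuple[str, str]]:
--     conflicts: list[tuple[str, str]] = []
--     for left in sorted(set(names), key=lambda value: (len(value), value)):
--         for right in sorted(set(names)):
--             if left == right:
--                 continue
--             if right.startswith(left):
--                 conflicts.append((left, right))
--     return conflicts
-- ===== SOURCE B (Python) =====
-- def _prefix_conflicts(names: list[str]) -> list[tuple[str, str]]:
--     # Sort the distinct names once; strings sharing a prefix are then adjacent,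
--     # so each name's prefix-extensions form the contiguous block right after it.
--     uniq = sorted(set(names))
--     block: dict[str, list[str]] = {}
--     for i, left in enumerate(uniq):
--         rights = []
--         j = i + 1
--         while j < len(uniq) and uniq[j].startswith(left):
--             rights.append(uniq[j])
--             j += 1
--         block[left] = rights
--     out = []
--     for left in sorted(set(names), key=lambda value: (len(value), value)):
--         for right in block.get(left, []):
--             out.append((left, right))
--     return out
-- ===== Notes on version B (the rewrite author's own statement) =====
-- stated objective: faster
-- what changed: Instead of re-sorting the whole set for every left and scanning all names for prefix matches, B sorts the distinct names once lexicographically and reads each name's prefix-extensions off the contiguous block that follows it in that sorted list, storing the blocks in a dict keyed by name.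
import Mathlib
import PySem

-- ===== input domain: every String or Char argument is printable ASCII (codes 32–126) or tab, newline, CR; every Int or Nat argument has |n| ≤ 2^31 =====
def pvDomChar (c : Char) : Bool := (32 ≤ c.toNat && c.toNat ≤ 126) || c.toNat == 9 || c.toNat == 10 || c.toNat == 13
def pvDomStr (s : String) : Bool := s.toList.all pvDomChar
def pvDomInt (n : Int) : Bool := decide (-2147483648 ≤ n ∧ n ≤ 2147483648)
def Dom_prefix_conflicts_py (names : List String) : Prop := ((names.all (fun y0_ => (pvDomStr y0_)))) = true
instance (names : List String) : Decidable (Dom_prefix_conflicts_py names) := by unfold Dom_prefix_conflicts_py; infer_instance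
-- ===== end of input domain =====

-- B sorts the distinct names once and reads each name's prefix-extensions off the
-- contiguous block following it in the lexicographically sorted list (objective: faster).

-- ===== PORT A =====
def prefix_conflicts_py (names : List String) : List (String × String) :=
  (PySem.List.sorted2 (PySem.Set.ofList names)
      (fun value => PySem.Str.len value) (fun value => value)).foldl
    (fun conflicts left =>
      (PySem.List.sorted (PySem.Set.ofList names) (fun value => value)).foldl
        (fun conflicts right =>
          if left == right then conflicts
          else if PySem.Str.startswith right left then conflicts ++ [(left, right)]
          else conflicts)
        conflicts)
    []

-- ===== PORT B =====
-- the inner 'while' of Source B: collect uniq[j] while it startswith left, from j = i+1 on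
def pvScanB (left : String) : List String → List String
  | [] => []
  | r :: rest => if PySem.Str.startswith r left then r :: pvScanB left rest else []

-- the 'for i, left in enumerate(uniq)' loop of Source B: each left is paired with the
-- scan of the suffix that follows it
def pvBlocksB (d : PySem.Dict String (List String)) : List String → PySem.Dict String (List String)
  | [] => d
  | l :: rest => pvBlocksB (d.insert l (pvScanB l rest)) rest

def prefix_conflicts_py_alt (names : List String) : List (String × String) :=
  let uniq := PySem.List.sorted (PySem.Set.ofList names) (fun value => value)
  let block := pvBlocksB PySem.Dict.empty uniq
  (PySem.List.sorted2 (PySem.Set.ofList names)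
      (fun value => PySem.Str.len value) (fun value => value)).foldl
    (fun out left =>
      (PySem.Dict.getD block left []).foldl
        (fun out right => out ++ [(left, right)]) out)
    []

-- ===== PRECONDITION & SPEC =====
def Spec_prefix_conflicts_py (names : List String) (out : List (String × String)) : Prop := out = prefix_conflicts_py_alt names
instance (names : List String) (out : List (String × String)) : Decidable (Spec_prefix_conflicts_py names out) := by unfold Spec_prefix_conflicts_py; infer_instance

-- ===== CLAIM (what is proved, stated in full; the proofs are below) =====
def Claim_equal_prefix_conflicts_py : Prop := ∀ (names : List String), Dom_prefix_conflicts_py names → Spec_prefix_conflicts_py names (prefix_conflicts_py names)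

-- ===== LEMMAS AND PROOFS =====

-- a prefix is lexicographically ≤ its extensions (core list order)
theorem pvListPrefixLe : ∀ (l s : List Char), l <+: s → @LE.le _ List.instLE l s := by
  intro l
  induction l with
  | nil => intro s _; exact List.nil_le s
  | cons c l ih =>
    intro s hp
    obtain ⟨t, ht⟩ := hp
    subst ht
    exact List.cons_le_cons_iff.mpr (Or.inr ⟨rfl, ih _ ⟨t, rfl⟩⟩)

-- the strings extending a prefix l form a lexicographic interval
theorem pvListPrefixInterval : ∀ (l a b : List Char),
    @LE.le _ List.instLE l a → @LE.le _ List.instLE a b → l <+: b → l <+: a := by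
  intro l
  induction l with
  | nil => intro a b _ _ _; exact List.nil_prefix
  | cons c l ih =>
    intro a b hla hab hpb
    obtain ⟨t, ht⟩ := hpb
    subst ht
    cases a with
    | nil =>
      exfalso
      rcases List.le_iff_lt_or_eq.mp hla with h | h
      · exact absurd h (by simp)
      · simp at h
    | cons d a' =>
      rcases List.cons_le_cons_iff.mp hla with h | ⟨rfl, hla'⟩
      · rcases List.cons_le_cons_iff.mp hab with h2 | ⟨h2, _⟩
        · exact absurd h2 (lt_asymm h)
        · exact absurd (h2 ▸ h) (lt_irrefl _)
      · rcases List.cons_le_cons_iff.mp hab with h2 | ⟨h2, hab'⟩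
        · exact absurd h2 (lt_irrefl _)
        · obtain ⟨u, hu⟩ := ih a' (l ++ t) hla' hab' ⟨t, rfl⟩
          exact ⟨u, by simp [hu]⟩

theorem pvStrLeIff (s t : String) : s ≤ t ↔ @LE.le _ List.instLE s.toList t.toList := by
  rw [← not_lt, String.lt_iff_toList_lt, ← List.not_lt]

theorem pvStartswithLe (s l : String) (h : PySem.Str.startswith s l = true) : l ≤ s := by
  rw [PySem.Str.startswith_eq, PySem.Chars.startswith] at h
  exact (pvStrLeIff l s).mpr (pvListPrefixLe _ _ (List.isPrefixOf_iff_prefix.mp h))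

theorem pvStartswithInterval (l a b : String) (hla : l ≤ a) (hab : a ≤ b)
    (h : PySem.Str.startswith b l = true) : PySem.Str.startswith a l = true := by
  rw [PySem.Str.startswith_eq, PySem.Chars.startswith] at h ⊢
  rw [List.isPrefixOf_iff_prefix] at h ⊢
  exact pvListPrefixInterval _ _ _ ((pvStrLeIff l a).mp hla) ((pvStrLeIff a b).mp hab) h

-- on a strictly increasing list of strings all above l, the scan-until-failure
-- collects exactly the extensions of l
theorem pvScan_eq_filter (l : String) (rest : List String)
    (hp : rest.Pairwise (· < ·)) (hgt : ∀ r ∈ rest, l < r) :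
    pvScanB l rest = rest.filter (fun r => !(l == r) && PySem.Str.startswith r l) := by
  induction rest with
  | nil => rfl
  | cons r rs ih =>
    rw [List.pairwise_cons] at hp
    have hlr : l < r := hgt r (List.mem_cons_self)
    have hne : (l == r) = false := by simp [ne_of_lt hlr]
    by_cases h : PySem.Str.startswith r l = true
    · simp only [pvScanB, h, if_true, List.filter_cons, hne, Bool.not_false, Bool.true_and]
      exact congrArg (r :: ·) (ih hp.2 (fun s hs => hgt s (List.mem_cons_of_mem _ hs)))
    · rw [Bool.not_eq_true] at h
      simp only [pvScanB, h, Bool.false_eq_true, if_false]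
      symm
      have hc : PySem.Chars.startswith r.toList l.toList = false := by simpa using h
      rw [List.filter_eq_nil_iff]
      intro s hs
      rcases List.mem_cons.mp hs with rfl | hs
      · simp [hc]
      · simp only [Bool.and_eq_true, Bool.not_eq_true', beq_eq_false_iff_ne, ne_eq, not_and]
        intro _ hsw
        exact absurd (pvStartswithInterval l r s (le_of_lt hlr) (le_of_lt (hp.1 s hs)) hsw)
          (by simp [hc])

theorem pvBlocks_get?_not_mem (us : List String) : ∀ (d : PySem.Dict String (List String))
    (k : String), k ∉ us → PySem.Dict.get? (pvBlocksB d us) k = PySem.Dict.get? d k := by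
  induction us with
  | nil => intro d k _; rfl
  | cons x rest ih =>
    intro d k hk
    rw [List.mem_cons, not_or] at hk
    rw [pvBlocksB, ih _ _ hk.2, PySem.Dict.get?_insert_of_ne _ _ hk.1]

-- the dict built by Source B's first loop maps each name of the strictly sorted list
-- to exactly the filter A's inner loop computes for that name
theorem pvBlocks_getD (us : List String) : ∀ (d : PySem.Dict String (List String)) (l : String),
    us.Pairwise (· < ·) → l ∈ us → PySem.Dict.get? d l = none →
    PySem.Dict.getD (pvBlocksB d us) l [] =
      us.filter (fun r => !(l == r) && PySem.Str.startswith r l) := by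
  induction us with
  | nil => intro _ l _ hl _; exact absurd hl (List.not_mem_nil)
  | cons x rest ih =>
    intro d l hp hl hd
    rw [List.pairwise_cons] at hp
    rcases List.mem_cons.mp hl with rfl | hl
    · have hx : l ∉ rest := fun h => absurd (hp.1 l h) (lt_irrefl l)
      rw [pvBlocksB, PySem.Dict.getD_eq_get?_getD, pvBlocks_get?_not_mem _ _ _ hx,
        PySem.Dict.get?_insert_self]
      rw [List.filter_cons_of_neg (by simp)]
      exact pvScan_eq_filter l rest hp.2 hp.1
    · have hxl : x < l := hp.1 l hl
      rw [pvBlocksB, List.filter_cons_of_neg (by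
        intro hcontra
        rw [Bool.and_eq_true] at hcontra
        rcases hcontra with ⟨h1, h2⟩
        exact absurd (pvStartswithLe x l h2) (not_le.mpr hxl))]
      exact ih _ _ hp.2 hl (by rw [PySem.Dict.get?_insert_of_ne _ _ (ne_of_lt hxl).symm]; exact hd)

theorem pvMain (names : List String) : prefix_conflicts_py names = prefix_conflicts_py_alt names := by
  unfold prefix_conflicts_py prefix_conflicts_py_alt
  apply PySem.List.foldl_congr_mem
  intro acc l hl
  have hlS : l ∈ PySem.Set.ofList names :=
    (PySem.List.sorted2_perm _ _ _ _).mem_iff.mp hl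
  have hlus : l ∈ PySem.List.sorted (PySem.Set.ofList names) (fun value => value) :=
    (PySem.List.mem_sorted _ _ _ _).mpr hlS
  have hsorted := PySem.List.sorted_ofList_pairwise_lt (κ := String) names
  have hinner :
      (fun (conflicts : List (String × String)) right =>
        if l == right then conflicts
        else if PySem.Str.startswith right l then conflicts ++ [(l, right)]
        else conflicts)
      = (fun conflicts right =>
        if !(l == right) && PySem.Str.startswith right l then conflicts ++ [(l, right)]
        else conflicts) := by
    funext conflicts right
    cases l == right
    · simp
    · simp
  rw [hinner, PySem.List.foldl_append_if, PySem.List.foldl_append_singleton_eq_map,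
    pvBlocks_getD _ _ _ hsorted hlus (PySem.Dict.get?_empty l)]

-- ===== VERDICT (by name: the statement is the Claim_ definition above) =====
theorem prefix_conflicts_py_spec : Claim_equal_prefix_conflicts_py := by
  intro names _
  show prefix_conflicts_py names = prefix_conflicts_py_alt names
  exact pvMain names
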